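-- pv_equiv track=rewrite | github.com/sanjanamani/ai-lead-gen-agent | config/prompts.py | enhance_company_search_query
-- ===== SOURCE A (Python) =====
-- def enhance_company_search_query(base_query: str) -> str:
--     """Enhance user query for better company discovery"""
--     enhancements = {
--         "failed": "terminated OR suspended OR withdrawn",
--         "biotech": "biotech OR biopharmaceutical OR pharma",
--         "oncology": "oncology OR cancer OR tumor",
--         "phase 2": "\"phase 2\" OR \"phase ii\"",
--         "phase 3": "\"phase 3\" OR \"phase iii\"",
--     }
--
--     enhanced = base_query.lower()
--     for key, replacement in enhancements.items():
--         if key in enhanced: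
--             enhanced = enhanced.replace(key, f"({replacement})")
--
--     return enhanced
-- ===== SOURCE B (Python) =====
-- def enhance_company_search_query(base_query: str) -> str:
--     """Single left-to-right scan: at each position try the keyword table once;
--     on a hit emit the parenthesised expansion and skip the keyword, else copy the char."""
--     enhancements = [
--         ("failed", "terminated OR suspended OR withdrawn"),
--         ("biotech", "biotech OR biopharmaceutical OR pharma"),
--         ("oncology", "oncology OR cancer OR tumor"),
--         ("phase 2", "\"phase 2\" OR \"phase ii\""),
--         ("phase 3", "\"phase 3\" OR \"phase iii\""),
--     ]
--     s = base_query.lower()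
--     parts = []
--     i = 0
--     n = len(s)
--     while i < n:
--         for key, replacement in enhancements:
--             if s.startswith(key, i):
--                 parts.append("(" + replacement + ")")
--                 i += len(key)
--                 break
--         else:
--             parts.append(s[i])
--             i += 1
--     return "".join(parts)
-- ===== Notes on version B (the rewrite author's own statement) =====
-- stated objective: alternative
-- what changed: Replaces the five sequential full-string str.replace passes with one left-to-right scan over the lowered query that consults the keyword table at each position and emits the parenthesised expansion in place.
import Mathlib
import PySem

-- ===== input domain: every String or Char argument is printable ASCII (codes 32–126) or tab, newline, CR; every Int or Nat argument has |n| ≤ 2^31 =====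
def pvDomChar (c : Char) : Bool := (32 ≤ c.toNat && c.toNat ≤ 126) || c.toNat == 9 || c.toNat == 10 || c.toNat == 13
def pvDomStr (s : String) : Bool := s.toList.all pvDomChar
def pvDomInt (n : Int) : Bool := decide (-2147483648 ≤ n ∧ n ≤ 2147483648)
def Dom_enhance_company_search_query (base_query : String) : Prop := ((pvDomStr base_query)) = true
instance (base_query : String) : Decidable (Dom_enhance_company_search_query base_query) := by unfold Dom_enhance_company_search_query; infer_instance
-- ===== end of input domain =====

-- B replaces A's five sequential full-string replace passes by one left-to-right scan with a keyword table (return value only; neither mutates anything).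

-- ===== PORT A =====
def enhance_company_search_query (base_query : String) : String :=
  -- enhanced = base_query.lower(); then for each (key, replacement) in dict order:
  -- if key in enhanced: enhanced = enhanced.replace(key, f"({replacement})")
  let e0 := PySem.Str.lower base_query
  let e1 := if PySem.Str.isIn "failed" e0 then PySem.Str.replace e0 "failed" "(terminated OR suspended OR withdrawn)" else e0
  let e2 := if PySem.Str.isIn "biotech" e1 then PySem.Str.replace e1 "biotech" "(biotech OR biopharmaceutical OR pharma)" else e1
  let e3 := if PySem.Str.isIn "oncology" e2 then PySem.Str.replace e2 "oncology" "(oncology OR cancer OR tumor)" else e2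
  let e4 := if PySem.Str.isIn "phase 2" e3 then PySem.Str.replace e3 "phase 2" "(\"phase 2\" OR \"phase ii\")" else e3
  let e5 := if PySem.Str.isIn "phase 3" e4 then PySem.Str.replace e4 "phase 3" "(\"phase 3\" OR \"phase iii\")" else e4
  e5

-- ===== PORT B =====
-- the keyword table of Source B (keys with their raw replacements; the scan adds the parentheses)
def pvTable : List (List Char × List Char) :=
  [("failed".toList, "terminated OR suspended OR withdrawn".toList),
   ("biotech".toList, "biotech OR biopharmaceutical OR pharma".toList),
   ("oncology".toList, "oncology OR cancer OR tumor".toList),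
   ("phase 2".toList, "\"phase 2\" OR \"phase ii\"".toList),
   ("phase 3".toList, "\"phase 3\" OR \"phase iii\"".toList)]

-- Source B's inner 'for key, replacement in enhancements: if s.startswith(key, i)' loop
def pvFirstMatch : List (List Char × List Char) → List Char → Option (List Char × List Char)
  | [], _ => none
  | (k, r) :: rest, l => if k.isPrefixOf l then some (k, r) else pvFirstMatch rest l

-- Source B's 'while i < n' scan (the suffix s[i:] is the recursion argument)
def pvScan : List Char → List Char
  | [] => []
  | c :: t =>
    match pvFirstMatch pvTable (c :: t) with
    | some (k, r) => ('(' :: r ++ [')']) ++ pvScan (List.drop (k.length - 1) t)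
    | none => c :: pvScan t
termination_by l => l.length
decreasing_by all_goals (simp; try omega)

def enhance_company_search_query_alt (base_query : String) : String :=
  String.ofList (pvScan (PySem.Str.lower base_query).toList)

-- ===== PRECONDITION & SPEC =====
def Spec_enhance_company_search_query (base_query : String) (out : String) : Prop := out = enhance_company_search_query_alt base_query
instance (base_query : String) (out : String) : Decidable (Spec_enhance_company_search_query base_query out) := by unfold Spec_enhance_company_search_query; infer_instance

-- ===== CLAIM (what is proved, stated in full; the proofs are below) =====
def Claim_equal_enhance_company_search_query : Prop := ∀ (base_query : String), Dom_enhance_company_search_query base_query → Spec_enhance_company_search_query base_query (enhance_company_search_query base_query)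

-- ===== LEMMAS AND PROOFS =====

-- clean recursive form of Python str.replace (old nonempty)
def pvRep (old nw : List Char) : List Char → List Char
  | [] => []
  | c :: t =>
    if old.isPrefixOf (c :: t) then nw ++ pvRep old nw (List.drop (old.length - 1) t)
    else c :: pvRep old nw t
termination_by l => l.length
decreasing_by all_goals (simp; try omega)

-- "no occurrence of k can start inside pre": every start position hits a mismatch before pre ends
def pvNoCross (pre k : List Char) : Prop :=
  ∀ p < pre.length, ∃ m < k.length, p + m < pre.length ∧ k[m]? ≠ pre[p + m]?

def pvWrap (r : List Char) : List Char := '(' :: r ++ [')']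

-- the A-side chain of replace passes, list level
def pvChain (ps : List (List Char × List Char)) (l : List Char) : List Char :=
  ps.foldl (fun s p => pvRep p.1 (pvWrap p.2) s) l

def pvGood (ps : List (List Char × List Char)) : Prop :=
  (∀ p ∈ ps, p.1 ≠ [] ∧ '(' ∉ p.1) ∧
  List.Pairwise (fun a b => pvNoCross b.1 a.1 ∧ pvNoCross (pvWrap a.2) b.1) ps

theorem pvNoCross_cons (c : Char) (pre k : List Char) (h : pvNoCross (c :: pre) k) :
    pvNoCross pre k := by
  intro p hp
  obtain ⟨m, hm, hpm, hne⟩ := h (p + 1) (by simpa using Nat.succ_lt_succ hp)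
  refine ⟨m, hm, by simp only [List.length_cons] at hpm; omega, ?_⟩
  have : (c :: pre)[p + 1 + m]? = pre[p + m]? := by
    have : p + 1 + m = (p + m) + 1 := by omega
    rw [this]; simp
  rw [this] at hne
  exact hne

theorem pvGood_table : pvGood pvTable := by
  unfold pvGood pvNoCross pvWrap pvTable
  decide

theorem pvRep_nil (old nw : List Char) : pvRep old nw [] = [] := by simp [pvRep]

theorem pvRep_cons_not (old nw : List Char) (c : Char) (t : List Char) (h : ¬ old <+: c :: t) :
    pvRep old nw (c :: t) = c :: pvRep old nw t := by
  rw [pvRep]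
  simp [List.isPrefixOf_iff_prefix, h]

theorem pvRep_cons_yes (old nw : List Char) (c : Char) (t : List Char) (h : old <+: c :: t) :
    pvRep old nw (c :: t) = nw ++ pvRep old nw (List.drop (old.length - 1) t) := by
  rw [pvRep]
  simp [List.isPrefixOf_iff_prefix, h]

theorem pvRep_append_self (old nw u : List Char) (h : old ≠ []) :
    pvRep old nw (old ++ u) = nw ++ pvRep old nw u := by
  obtain ⟨a, o', rfl⟩ := List.exists_cons_of_ne_nil h
  rw [List.cons_append, pvRep_cons_yes _ _ _ _ (show (a :: o') <+: a :: (o' ++ u) from List.prefix_append (a :: o') u)]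
  simp

theorem pvRep_eq_self_of_not_infix (old nw : List Char) :
    ∀ l, ¬ old <:+: l → pvRep old nw l = l
  | [], _ => by simp [pvRep]
  | c :: t, h => by
    rw [pvRep_cons_not old nw c t (fun hp => h hp.isInfix),
        pvRep_eq_self_of_not_infix old nw t (fun hi => h (List.infix_cons hi))]

theorem pvGo_eq (old nw : List Char) (h : old ≠ []) :
    ∀ fuel l acc, l.length ≤ fuel →
      PySem.Chars.replace.go old nw fuel l acc = acc.reverse ++ pvRep old nw l := by
  intro fuel
  induction fuel with
  | zero =>
    intro l acc hl
    have : l = [] := List.eq_nil_of_length_eq_zero (Nat.le_zero.mp hl)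
    subst this
    rw [PySem.Chars.replace.go, pvRep_nil]
  | succ fuel ih =>
    intro l acc hl
    cases l with
    | nil => rw [PySem.Chars.replace.go, pvRep_nil]; simp; omega
    | cons c t =>
      rw [PySem.Chars.replace.go]
      by_cases hp : old <+: c :: t
      · obtain ⟨a, o', rfl⟩ := List.exists_cons_of_ne_nil h
        rw [if_pos (by simpa [List.isPrefixOf_iff_prefix] using hp)]
        have hlen : (List.drop (a :: o').length (c :: t)).length ≤ fuel := by
          simp at hl ⊢; omega
        rw [ih _ _ hlen, pvRep_cons_yes _ _ _ _ hp]
        simp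
      · rw [if_neg (by simpa [List.isPrefixOf_iff_prefix] using hp)]
        have hlen : t.length ≤ fuel := by simp at hl; omega
        rw [ih _ _ hlen, pvRep_cons_not _ _ _ _ hp]
        simp

theorem pvReplace_eq (old nw l : List Char) (h : old ≠ []) :
    PySem.Chars.replace l old nw = pvRep old nw l := by
  rw [PySem.Chars.replace, if_neg (by simpa [List.isEmpty_iff] using h)]
  rw [pvGo_eq old nw h l.length l [] le_rfl]
  simp

theorem pvStep_eq (old nw l : List Char) (h : old ≠ []) :
    (if PySem.Chars.isIn old l then PySem.Chars.replace l old nw else l) = pvRep old nw l := by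
  by_cases hin : PySem.Chars.isIn old l = true
  · rw [if_pos hin, pvReplace_eq old nw l h]
  · rw [if_neg (by simpa using hin),
        pvRep_eq_self_of_not_infix old nw l
          (fun hi => hin ((PySem.Chars.isIn_iff_infix _ _).mpr hi))]

theorem pvPrefix_through_nil (old r : List Char) :
    ∀ u w, '(' ∉ w → w <+: pvRep old (pvWrap r) u → w <+: u
  | [], w, _, h => by simpa [pvRep] using h
  | c :: t, w, hw, h => by
    by_cases hp : old <+: c :: t
    · rw [pvRep_cons_yes _ _ _ _ hp] at h
      cases w with
      | nil => exact List.nil_prefix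
      | cons a w' =>
        exfalso
        obtain ⟨s, hs⟩ := h
        rw [pvWrap, List.cons_append, List.cons_append] at hs
        have : a = '(' := (List.cons.injEq ..).mp hs |>.1
        exact hw (this ▸ List.mem_cons_self)
    · rw [pvRep_cons_not _ _ _ _ hp] at h
      cases w with
      | nil => exact List.nil_prefix
      | cons a w' =>
        rw [List.cons_prefix_cons] at h ⊢
        refine ⟨h.1, pvPrefix_through_nil old r t w' (fun hm => hw (List.mem_cons_of_mem _ hm)) h.2⟩

theorem pvPrefix_through (old r : List Char) :
    ∀ (y u w : List Char), '(' ∉ w → w <+: y ++ pvRep old (pvWrap r) u → w <+: y ++ u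
  | [], u, w, hw, h => by simpa using pvPrefix_through_nil old r u w hw (by simpa using h)
  | c :: y', u, w, hw, h => by
    cases w with
    | nil => exact List.nil_prefix
    | cons a w' =>
      rw [List.cons_append, List.cons_prefix_cons] at h ⊢
      exact ⟨h.1, pvPrefix_through old r y' u w' (fun hm => hw (List.mem_cons_of_mem _ hm)) h.2⟩

theorem pvKeep (old nw : List Char) :
    ∀ u w', w' <+: u → (∀ q < w'.length, ¬ old <+: u.drop q) → w' <+: pvRep old nw u
  | [], w', hpre, _ => by simpa [pvRep] using hpre
  | c :: t, w', hpre, hblock => by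
    cases w' with
    | nil => exact List.nil_prefix
    | cons a w'' =>
      have h0 : ¬ old <+: c :: t := by simpa using hblock 0 (by simp)
      rw [pvRep_cons_not _ _ _ _ h0]
      rw [List.cons_prefix_cons] at hpre ⊢
      refine ⟨hpre.1, pvKeep old nw t w'' hpre.2 ?_⟩
      intro q hq
      simpa using hblock (q + 1) (by simpa using Nat.succ_lt_succ hq)

theorem pvPrefix_rep_iff (old r w : List Char) (_hold : old ≠ []) (hw : '(' ∉ w)
    (hx : pvNoCross w old) (y u : List Char) :
    w <+: y ++ pvRep old (pvWrap r) u ↔ w <+: y ++ u := by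
  constructor
  · exact pvPrefix_through old r y u w hw
  · intro h
    by_cases hle : w.length ≤ y.length
    · exact (List.prefix_of_prefix_length_le h (List.prefix_append y u) hle).trans
        (List.prefix_append y _)
    · have hyw : y <+: w :=
        List.prefix_of_prefix_length_le (List.prefix_append y u) h (by omega)
      obtain ⟨w', rfl⟩ := hyw
      have hw'u : w' <+: u := by
        obtain ⟨s, hs⟩ := h
        rw [List.append_assoc] at hs
        exact ⟨s, List.append_cancel_left hs⟩
      have hblock : ∀ q < w'.length, ¬ old <+: u.drop q := by
        intro q hq hold2
        obtain ⟨m, hm, hpm, hne⟩ := hx (y.length + q) (by simp; omega)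
        apply hne
        obtain ⟨s2, hs2⟩ := hold2
        obtain ⟨s3, hs3⟩ := hw'u
        have e1 : old[m]? = (u.drop q)[m]? := by
          rw [← hs2, List.getElem?_append_left hm]
        have hqm : q + m < w'.length := by simp at hpm; omega
        have e2 : (u.drop q)[m]? = w'[q + m]? := by
          rw [List.getElem?_drop, ← hs3, List.getElem?_append_left hqm]
        have e3 : (y ++ w')[y.length + q + m]? = w'[q + m]? := by
          rw [List.getElem?_append_right (by omega)]
          congr 1
          omega
        rw [e1, e2, ← e3]
      obtain ⟨s4, hs4⟩ := pvKeep old (pvWrap r) u w' hw'u hblock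
      exact ⟨s4, by rw [List.append_assoc, hs4]⟩

theorem pvFirstMatch_none_iff (ps : List (List Char × List Char)) (l : List Char) :
    pvFirstMatch ps l = none ↔ ∀ p ∈ ps, ¬ p.1 <+: l := by
  induction ps with
  | nil => simp [pvFirstMatch]
  | cons p rest ih =>
    obtain ⟨k, r⟩ := p
    by_cases hp : k <+: l
    · simp [pvFirstMatch, List.isPrefixOf_iff_prefix, hp]
    · simp [pvFirstMatch, List.isPrefixOf_iff_prefix, hp, ih]

theorem pvFirstMatch_some_mem (ps : List (List Char × List Char)) (l : List Char)
    (k r : List Char) (h : pvFirstMatch ps l = some (k, r)) : (k, r) ∈ ps ∧ k <+: l := by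
  induction ps with
  | nil => simp [pvFirstMatch] at h
  | cons p rest ih =>
    obtain ⟨k0, r0⟩ := p
    by_cases hp : k0 <+: l
    · rw [pvFirstMatch, if_pos (by simpa [List.isPrefixOf_iff_prefix] using hp)] at h
      obtain ⟨rfl, rfl⟩ : k0 = k ∧ r0 = r := by simpa using h
      exact ⟨List.mem_cons_self, hp⟩
    · rw [pvFirstMatch, if_neg (by simpa [List.isPrefixOf_iff_prefix] using hp)] at h
      obtain ⟨h1, h2⟩ := ih h
      exact ⟨List.mem_cons_of_mem _ h1, h2⟩

theorem pvFirstMatch_congr (ps : List (List Char × List Char)) (l l' : List Char)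
    (h : ∀ p ∈ ps, (p.1 <+: l ↔ p.1 <+: l')) : pvFirstMatch ps l = pvFirstMatch ps l' := by
  induction ps with
  | nil => rfl
  | cons p rest ih =>
    obtain ⟨k, r⟩ := p
    have hiff := h (k, r) List.mem_cons_self
    by_cases hp : k <+: l
    · rw [pvFirstMatch, pvFirstMatch,
          if_pos (by simpa [List.isPrefixOf_iff_prefix] using hp),
          if_pos (by simpa [List.isPrefixOf_iff_prefix] using hiff.mp hp)]
    · rw [pvFirstMatch, pvFirstMatch,
          if_neg (by simpa [List.isPrefixOf_iff_prefix] using hp),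
          if_neg (by simpa [List.isPrefixOf_iff_prefix] using fun hc => hp (hiff.mpr hc))]
      exact ih (fun p hp => h p (List.mem_cons_of_mem _ hp))

theorem pvChain_nil (ps : List (List Char × List Char)) : pvChain ps [] = [] := by
  induction ps with
  | nil => rfl
  | cons p rest ih =>
    show pvChain rest (pvRep p.1 (pvWrap p.2) []) = []
    rw [pvRep_nil]
    exact ih

theorem pvRep_nocross (old nw : List Char) :
    ∀ (pre : List Char), pvNoCross pre old →
      ∀ t, pvRep old nw (pre ++ t) = pre ++ pvRep old nw t
  | [], _, t => by simp
  | c :: pre', h, t => by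
    have hnp : ¬ old <+: (c :: pre') ++ t := by
      intro hp
      obtain ⟨m, hm, hpm, hne⟩ := h 0 (by simp)
      apply hne
      obtain ⟨s, hs⟩ := hp
      have e1 : old[m]? = ((c :: pre') ++ t)[m]? := by
        rw [← hs, List.getElem?_append_left hm]
      have e2 : ((c :: pre') ++ t)[m]? = (c :: pre')[m]? :=
        List.getElem?_append_left (by simpa using hpm)
      simpa using e1.trans e2
    rw [List.cons_append, pvRep_cons_not _ _ _ _ (by simpa using hnp), List.cons_append,
        pvRep_nocross old nw pre' (pvNoCross_cons c pre' old h) t]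

theorem pvChain_append (ps : List (List Char × List Char)) (pre : List Char)
    (h : ∀ p ∈ ps, pvNoCross pre p.1) : ∀ (z : List Char),
    pvChain ps (pre ++ z) = pre ++ pvChain ps z := by
  induction ps with
  | nil => intro z; rfl
  | cons p rest ih =>
    intro z
    show pvChain rest (pvRep p.1 (pvWrap p.2) (pre ++ z)) = pre ++ pvChain rest (pvRep p.1 (pvWrap p.2) z)
    rw [pvRep_nocross p.1 (pvWrap p.2) pre (h p List.mem_cons_self) z]
    exact ih (fun q hq => h q (List.mem_cons_of_mem _ hq)) _

theorem pvChain_nomatch (ps : List (List Char × List Char)) (hg : pvGood ps) (c : Char) :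
    ∀ t, (∀ p ∈ ps, ¬ p.1 <+: c :: t) → pvChain ps (c :: t) = c :: pvChain ps t := by
  induction ps with
  | nil => intro t _; rfl
  | cons p rest ih =>
    intro t h
    obtain ⟨k0, r0⟩ := p
    have hrest : pvGood rest := ⟨fun q hq => hg.1 q (List.mem_cons_of_mem _ hq),
      (List.pairwise_cons.mp hg.2).2⟩
    have h0 : ¬ k0 <+: c :: t := h (k0, r0) List.mem_cons_self
    show pvChain rest (pvRep k0 (pvWrap r0) (c :: t)) = c :: pvChain rest (pvRep k0 (pvWrap r0) t)
    rw [pvRep_cons_not _ _ _ _ h0]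
    apply ih hrest
    intro p hp hpre
    have hparen : '(' ∉ p.1 := (hg.1 p (List.mem_cons_of_mem _ hp)).2
    exact h p (List.mem_cons_of_mem _ hp)
      (pvPrefix_through k0 r0 [c] t p.1 hparen (by simpa using hpre))

theorem pvChain_match (ps : List (List Char × List Char)) (hg : pvGood ps) (k r : List Char) :
    ∀ l, pvFirstMatch ps l = some (k, r) →
      pvChain ps l = pvWrap r ++ pvChain ps (l.drop k.length) := by
  induction ps with
  | nil => intro l h; simp [pvFirstMatch] at h
  | cons p rest ih =>
    intro l h
    obtain ⟨k0, r0⟩ := p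
    have hrest : pvGood rest := ⟨fun q hq => hg.1 q (List.mem_cons_of_mem _ hq),
      (List.pairwise_cons.mp hg.2).2⟩
    have hk0ne : k0 ≠ [] := (hg.1 (k0, r0) List.mem_cons_self).1
    by_cases hp : k0 <+: l
    · rw [pvFirstMatch, if_pos (by simpa [List.isPrefixOf_iff_prefix] using hp)] at h
      obtain ⟨rfl, rfl⟩ : k0 = k ∧ r0 = r := by simpa using h
      obtain ⟨u, rfl⟩ := hp
      show pvChain rest (pvRep k0 (pvWrap r0) (k0 ++ u)) = _
      rw [pvRep_append_self _ _ _ hk0ne,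
          pvChain_append rest (pvWrap r0)
            (fun q hq => ((List.pairwise_cons.mp hg.2).1 q hq).2) _,
          List.drop_left]
      rfl
    · rw [pvFirstMatch, if_neg (by simpa [List.isPrefixOf_iff_prefix] using hp)] at h
      obtain ⟨hmem, hkl⟩ := pvFirstMatch_some_mem rest l k r h
      obtain ⟨u, rfl⟩ := hkl
      have hrel := (List.pairwise_cons.mp hg.2).1 (k, r) hmem
      have hNC : pvNoCross k k0 := hrel.1
      show pvChain rest (pvRep k0 (pvWrap r0) (k ++ u)) = _
      rw [pvRep_nocross k0 (pvWrap r0) k hNC u]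
      have hfm' : pvFirstMatch rest (k ++ pvRep k0 (pvWrap r0) u) = some (k, r) := by
        rw [← h]
        apply (pvFirstMatch_congr rest _ _ _)
        intro q hq
        have hparen : '(' ∉ q.1 := (hg.1 q (List.mem_cons_of_mem _ hq)).2
        have hqNC : pvNoCross q.1 k0 := ((List.pairwise_cons.mp hg.2).1 q hq).1
        exact (pvPrefix_rep_iff k0 r0 q.1 hk0ne hparen hqNC k u)
      rw [ih hrest _ hfm', List.drop_left, List.drop_left]
      rfl

theorem pvChain_eq_scan (l : List Char) : pvChain pvTable l = pvScan l := by
  cases hfm : pvFirstMatch pvTable l with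
  | none =>
    cases l with
    | nil => rw [pvChain_nil, pvScan]
    | cons c t =>
      rw [pvChain_nomatch pvTable pvGood_table c t ((pvFirstMatch_none_iff _ _).mp hfm),
          pvChain_eq_scan t, pvScan, hfm]
  | some p =>
    obtain ⟨k, r⟩ := p
    obtain ⟨hmem, hkl⟩ := pvFirstMatch_some_mem _ _ _ _ hfm
    have hkne : k ≠ [] := (pvGood_table.1 (k, r) hmem).1
    cases l with
    | nil =>
      exact absurd (List.prefix_nil.mp hkl) hkne
    | cons c t =>
      rw [pvChain_match pvTable pvGood_table k r _ hfm]
      have hd : (c :: t).drop k.length = t.drop (k.length - 1) := by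
        obtain ⟨a, k', rfl⟩ := List.exists_cons_of_ne_nil hkne
        simp
      rw [hd, pvChain_eq_scan (t.drop (k.length - 1)), pvScan, hfm, pvWrap]
termination_by l.length
decreasing_by all_goals (simp; try omega)

theorem pvStepS (old nw s : String) (h : old.toList ≠ []) :
    (if PySem.Str.isIn old s then PySem.Str.replace s old nw else s).toList
      = pvRep old.toList nw.toList s.toList := by
  rw [← pvStep_eq old.toList nw.toList s.toList h]
  by_cases hin : PySem.Chars.isIn old.toList s.toList = true
  · simp [PySem.Str.isIn, hin]
  · simp [PySem.Str.isIn, hin]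

theorem pvToListEq (s t : String) (h : s.toList = t.toList) : s = t := by
  have := congrArg String.ofList h
  simpa using this

-- ===== VERDICT (by name: the statement is the Claim_ definition above) =====
theorem enhance_company_search_query_spec : Claim_equal_enhance_company_search_query := by
  intro bq _
  show enhance_company_search_query bq = enhance_company_search_query_alt bq
  apply pvToListEq
  simp only [enhance_company_search_query, enhance_company_search_query_alt]
  rw [pvStepS _ _ _ (by decide), pvStepS _ _ _ (by decide), pvStepS _ _ _ (by decide),
      pvStepS _ _ _ (by decide), pvStepS _ _ _ (by decide)]
  have hR : (String.ofList (pvScan (PySem.Str.lower bq).toList)).toList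
      = pvChain pvTable (PySem.Str.lower bq).toList := by
    rw [← pvChain_eq_scan]; simp
  rw [hR]
  simp only [pvChain, pvTable, List.foldl_cons, List.foldl_nil]
  have w1 : pvWrap "terminated OR suspended OR withdrawn".toList
      = "(terminated OR suspended OR withdrawn)".toList := by decide
  have w2 : pvWrap "biotech OR biopharmaceutical OR pharma".toList
      = "(biotech OR biopharmaceutical OR pharma)".toList := by decide
  have w3 : pvWrap "oncology OR cancer OR tumor".toList
      = "(oncology OR cancer OR tumor)".toList := by decide
  have w4 : pvWrap "\"phase 2\" OR \"phase ii\"".toList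
      = "(\"phase 2\" OR \"phase ii\")".toList := by decide
  have w5 : pvWrap "\"phase 3\" OR \"phase iii\"".toList
      = "(\"phase 3\" OR \"phase iii\")".toList := by decide
  rw [w1, w2, w3, w4, w5]
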